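-- pv_equiv track=rewrite | github.com/VVKot/coding-competitions | leetcode/1171_remove_zero_sum_consecutive_nodes_from_linked_list.py | _get_removed_nodes
-- ===== SOURCE A (Python) =====
-- from typing import List
--
-- def _get_removed_nodes(nodes: List[int]) -> List[bool]:
--     N = len(nodes)
--     removed = [False] * N
--     for i in range(N):
--         if removed[i]:
--             continue
--         j = i
--         curr_sum = 0
--         while j < N:
--             if not removed[j]:
--                 curr_sum += nodes[j]
--             j += 1
--             if curr_sum == 0:
--                 break
--         if curr_sum == 0:
--             for k in range(i, min(N, j)):
--                 removed[k] = True
--     return removed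
-- ===== SOURCE B (Python) =====
-- from typing import List
--
-- def _get_removed_nodes(nodes: List[int]) -> List[bool]:
--     # O(N): prefix sums + one reverse pass building next-equal-prefix links,
--     # then a left-to-right greedy jump over zero-sum segments.
--     N = len(nodes)
--     prefix = [0]
--     s = 0
--     for v in nodes:
--         s += v
--         prefix.append(s)
--     nxt = [None] * (N + 1)
--     seen = {}
--     for k in range(N, -1, -1):
--         nxt[k] = seen.get(prefix[k])
--         seen[prefix[k]] = k
--     removed = [False] * N
--     i = 0
--     while i < N:
--         j = nxt[i]
--         if j is not None:
--             for k in range(i, j):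
--                 removed[k] = True
--             i = j
--         else:
--             i += 1
--     return removed
-- ===== Notes on version B (the rewrite author's own statement) =====
-- stated objective: faster
-- what changed: A rescans the suffix from every index accumulating a running sum to find a zero-sum segment (O(N^2)); B computes prefix sums once, builds next-equal-prefix links with a dict in one reverse pass, and jumps left-to-right over the zero-sum segments in O(N).
import Mathlib
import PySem

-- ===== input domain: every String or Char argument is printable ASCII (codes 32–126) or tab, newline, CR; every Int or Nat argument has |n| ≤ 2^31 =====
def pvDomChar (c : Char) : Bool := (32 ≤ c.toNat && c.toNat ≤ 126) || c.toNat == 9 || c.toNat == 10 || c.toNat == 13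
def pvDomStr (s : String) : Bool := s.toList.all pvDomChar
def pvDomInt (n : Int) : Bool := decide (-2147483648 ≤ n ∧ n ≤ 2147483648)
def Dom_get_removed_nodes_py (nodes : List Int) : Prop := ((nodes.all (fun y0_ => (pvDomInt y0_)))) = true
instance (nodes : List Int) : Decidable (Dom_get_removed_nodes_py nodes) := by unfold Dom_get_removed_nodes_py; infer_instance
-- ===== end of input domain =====

-- B replaces A's per-index suffix rescans by prefix sums plus one reverse pass of
-- next-equal-prefix links and a single left-to-right jump pass (objective: faster, O(n^2) → O(n)).

-- ===== PORT A =====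
-- inner `while j < N:` loop of A; all list indices are in range in A, so getD is exact
def pvInnerA (nodes : List Int) (removed : List Bool) (j : Nat) (s : Int) : Nat × Int :=
  if _h : j < nodes.length then
    let s' := if removed.getD j false then s else s + nodes.getD j 0
    if s' = 0 then (j + 1, s') else pvInnerA nodes removed (j + 1) s'
  else (j, s)
termination_by nodes.length - j

-- body of A's `for i in range(N)` loop
def pvStepA (nodes : List Int) (removed : List Bool) (i : Nat) : List Bool :=
  if removed.getD i false then removed
  else
    let p := pvInnerA nodes removed i 0
    if p.2 = 0 then
      (List.range' i (min nodes.length p.1 - i)).foldl (fun r k => r.set k true) removed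
    else removed

def get_removed_nodes_py (nodes : List Int) : List Bool :=
  (List.range nodes.length).foldl (pvStepA nodes) (List.replicate nodes.length false)

-- ===== PORT B =====
-- `prefix = [0]; s = 0; for v in nodes: s += v; prefix.append(s)`
def pvPrefixB (nodes : List Int) : List Int :=
  (nodes.foldl (fun ps v => (ps.1 ++ [ps.2 + v], ps.2 + v)) (([0] : List Int), (0 : Int))).1

-- `for k in range(N, -1, -1): nxt[k] = seen.get(prefix[k]); seen[prefix[k]] = k`
-- range(N,-1,-1) enumerates the naturals N..0, ported as (List.range (N+1)).reverse (exact);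
-- all indices into `prefix` are in range, so getD is exact
def pvNxtB (nodes : List Int) (pfxl : List Int) : List (Option Nat) :=
  (((List.range (nodes.length + 1)).reverse).foldl
    (fun st k => (st.1.set k (st.2.get? (pfxl.getD k 0)), st.2.insert (pfxl.getD k 0) k))
    (List.replicate (nodes.length + 1) (none : Option Nat), (PySem.Dict.empty : PySem.Dict Int Nat))).1

-- `while i < N:` loop of B; fuel N is a totality guard only (i strictly increases each turn)
def pvLoopB (nxt : List (Option Nat)) (N : Nat) : Nat → List Bool → Nat → List Bool
  | 0, removed, _ => removed
  | fuel + 1, removed, i =>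
    if i < N then
      match nxt.getD i none with
      | some j => pvLoopB nxt N fuel ((List.range' i (j - i)).foldl (fun r k => r.set k true) removed) j
      | none => pvLoopB nxt N fuel removed (i + 1)
    else removed

def get_removed_nodes_py_alt (nodes : List Int) : List Bool :=
  pvLoopB (pvNxtB nodes (pvPrefixB nodes)) nodes.length nodes.length
    (List.replicate nodes.length false) 0

-- ===== PRECONDITION & SPEC =====
def Spec_get_removed_nodes_py (nodes : List Int) (out : List Bool) : Prop := out = get_removed_nodes_py_alt nodes
instance (nodes : List Int) (out : List Bool) : Decidable (Spec_get_removed_nodes_py nodes out) := by unfold Spec_get_removed_nodes_py; infer_instance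

-- ===== CLAIM (what is proved, stated in full; the proofs are below) =====
def Claim_equal_get_removed_nodes_py : Prop := ∀ (nodes : List Int), Dom_get_removed_nodes_py nodes → Spec_get_removed_nodes_py nodes (get_removed_nodes_py nodes)

-- ===== LEMMAS AND PROOFS =====

def pvPfx (nodes : List Int) (k : Nat) : Int := (nodes.take k).sum

def pvMj (nodes : List Int) (i : Nat) : Option Nat :=
  (List.range' (i + 1) (nodes.length - i)).find? (fun m => decide (pvPfx nodes m = pvPfx nodes i))

theorem pvPfx_succ (nodes : List Int) (k : Nat) (hk : k < nodes.length) :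
    pvPfx nodes (k + 1) = pvPfx nodes k + nodes.getD k 0 := by
  rw [pvPfx, pvPfx, List.getD_eq_getElem?_getD, List.getElem?_eq_getElem hk]
  exact List.sum_take_succ _ _ hk

theorem pv_markLen (l : List Nat) (r : List Bool) :
    (l.foldl (fun r k => r.set k true) r).length = r.length := by
  induction l generalizing r with
  | nil => rfl
  | cons a l ih => simp [List.foldl_cons, ih, List.length_set]

theorem pv_markGetD (l : List Nat) (r : List Bool) (k : Nat) :
    (l.foldl (fun r k => r.set k true) r).getD k false
      = if k ∈ l ∧ k < r.length then true else r.getD k false := by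
  induction l generalizing r with
  | nil => simp
  | cons a l ih =>
    rw [List.foldl_cons, ih]
    by_cases hak : k = a
    · subst hak
      by_cases hkr : k < r.length
      · simp [List.getD_eq_getElem?_getD, hkr]
      · simp [hkr, List.set_eq_of_length_le (Nat.le_of_not_lt hkr)]
    · simp [List.length_set, List.getD_eq_getElem?_getD, List.getElem?_set_ne (fun h => hak h.symm)]
      by_cases hkl : k ∈ l <;> simp [hkl, hak]

theorem pv_find?_congr {α : Type} (l : List α) (p q : α → Bool) (h : ∀ a ∈ l, p a = q a) :
    l.find? p = l.find? q := by
  induction l with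
  | nil => rfl
  | cons a l ih =>
    rw [List.find?_cons, List.find?_cons, h a (List.mem_cons_self), ih (fun b hb => h b (List.mem_cons_of_mem _ hb))]

theorem pvInnerA_char (nodes : List Int) (removed : List Bool) :
    ∀ (t j : Nat) (s : Int), nodes.length - j = t → j ≤ nodes.length →
    (∀ k, j ≤ k → k < nodes.length → removed.getD k false = false) →
    pvInnerA nodes removed j s =
      match (List.range' (j + 1) (nodes.length - j)).find?
          (fun m => decide (s + (pvPfx nodes m - pvPfx nodes j) = 0)) with
      | some m => (m, 0)
      | none => (nodes.length, s + (pvPfx nodes nodes.length - pvPfx nodes j)) := by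
  intro t
  induction t with
  | zero =>
    intro j s ht hj _
    have hje : j = nodes.length := by omega
    subst hje
    rw [pvInnerA]
    simp
  | succ t ih =>
    intro j s ht hj hrem
    have h : j < nodes.length := by omega
    have hr : removed.getD j false = false := hrem j le_rfl h
    have hs' : s + nodes.getD j 0 = s + (pvPfx nodes (j + 1) - pvPfx nodes j) := by
      rw [pvPfx_succ nodes j h]; ring
    have hrange : List.range' (j + 1) (nodes.length - j)
        = (j + 1) :: List.range' (j + 2) (nodes.length - (j + 1)) := by
      have : nodes.length - j = (nodes.length - (j + 1)) + 1 := by omega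
      rw [this, List.range'_succ]
    rw [pvInnerA]
    simp only [h, dif_pos, hr, Bool.false_eq_true, if_false]
    by_cases hz : s + nodes.getD j 0 = 0
    · rw [if_pos hz, hrange, List.find?_cons]
      have : (s + (pvPfx nodes (j + 1) - pvPfx nodes j) = 0) := by rw [← hs']; exact hz
      simp [this]
      exact hz
    · rw [if_neg hz, ih (j + 1) (s + nodes.getD j 0) (by omega) (by omega)
        (fun k hk1 hk2 => hrem k (by omega) hk2), hrange, List.find?_cons]
      have hpz : ¬ (s + (pvPfx nodes (j + 1) - pvPfx nodes j) = 0) := by rw [← hs']; exact hz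
      simp only [hpz, decide_false]
      rw [pv_find?_congr _ _ (fun m => decide (s + (pvPfx nodes m - pvPfx nodes j) = 0))
        (fun m _ => by rw [hs']; exact decide_eq_decide.mpr (by constructor <;> intro <;> omega))]
      have : s + nodes.getD j 0 + (pvPfx nodes nodes.length - pvPfx nodes (j + 1))
          = s + (pvPfx nodes nodes.length - pvPfx nodes j) := by rw [hs']; ring
      cases hfind : (List.range' (j + 2) (nodes.length - (j + 1))).find?
          (fun m => decide (s + (pvPfx nodes m - pvPfx nodes j) = 0)) <;>
        simp only [List.getD_eq_getElem?_getD] at this <;> simp [this]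

theorem pvMj_some (nodes : List Int) (i m : Nat) (h : pvMj nodes i = some m) :
    i < m ∧ m ≤ nodes.length := by
  have := List.mem_of_find?_eq_some h
  rw [List.mem_range'_1] at this
  omega

theorem pvStepA_char (nodes : List Int) (removed : List Bool) (i : Nat)
    (hi : i < nodes.length)
    (hrem : ∀ k, i ≤ k → k < nodes.length → removed.getD k false = false) :
    pvStepA nodes removed i =
      match pvMj nodes i with
      | some m => (List.range' i (m - i)).foldl (fun r k => r.set k true) removed
      | none => removed := by
  have hrfalse : removed.getD i false = false := hrem i le_rfl hi
  have hchar := pvInnerA_char nodes removed (nodes.length - i) i 0 rfl (Nat.le_of_lt hi) hrem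
  have hcongr : (List.range' (i + 1) (nodes.length - i)).find?
      (fun m => decide ((0:Int) + (pvPfx nodes m - pvPfx nodes i) = 0))
      = pvMj nodes i := by
    apply pv_find?_congr
    intro m _
    exact decide_eq_decide.mpr (by constructor <;> intro <;> omega)
  rw [pvStepA, if_neg (by rw [hrfalse]; simp)]
  cases hmj : pvMj nodes i with
  | some m =>
    have hm := pvMj_some nodes i m hmj
    rw [hcongr, hmj] at hchar
    simp only [hchar]
    have : min nodes.length m = m := by omega
    simp [this]
  | none =>
    rw [hcongr, hmj] at hchar
    simp only [hchar]
    have hN : (nodes.length : Nat) ∈ List.range' (i + 1) (nodes.length - i) := by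
      rw [List.mem_range'_1]; omega
    have hnone := List.find?_eq_none.mp (hcongr.trans hmj) _ hN
    simp only [decide_eq_true_eq] at hnone
    simp
    intro hc
    exact (hnone (by omega)).elim

theorem pv_skip (nodes : List Int) :
    ∀ (m i : Nat) (r : List Bool), (∀ k, i ≤ k → k < i + m → r.getD k false = true) →
    (List.range' i m).foldl (pvStepA nodes) r = r := by
  intro m
  induction m with
  | zero => intro i r _; rfl
  | succ m ih =>
    intro i r hr
    rw [List.range'_succ, List.foldl_cons]
    have hstep : pvStepA nodes r i = r := by
      rw [pvStepA, if_pos (hr i le_rfl (by omega))]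
    rw [hstep]
    exact ih (i + 1) r (fun k hk1 hk2 => hr k (by omega) (by omega))

-- partial sums starting from s (proof helper for pvPrefixB)
def pvPsl (s : Int) : List Int → List Int
  | [] => []
  | v :: t => (s + v) :: pvPsl (s + v) t

theorem pvPrefixB_fold (l : List Int) :
    ∀ (p : List Int) (s : Int),
    (l.foldl (fun ps v => (ps.1 ++ [ps.2 + v], ps.2 + v)) (p, s)) = (p ++ pvPsl s l, s + l.sum) := by
  induction l with
  | nil => intro p s; simp [pvPsl]
  | cons v t ih =>
    intro p s
    rw [List.foldl_cons, ih]
    simp [pvPsl]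
    ring

theorem pvPsl_getD (l : List Int) :
    ∀ (s : Int) (k : Nat), k < l.length →
    (pvPsl s l).getD k 0 = s + (l.take (k + 1)).sum := by
  induction l with
  | nil => intro s k h; simp at h
  | cons v t ih =>
    intro s k h
    cases k with
    | zero => simp [pvPsl]
    | succ k =>
      rw [pvPsl]
      simp only [List.getD_cons_succ]
      rw [ih (s + v) k (by simpa using h)]
      simp [List.take_succ_cons]
      ring

theorem pvPrefixB_getD (nodes : List Int) (k : Nat) (hk : k ≤ nodes.length) :
    (pvPrefixB nodes).getD k 0 = pvPfx nodes k := by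
  rw [pvPrefixB, pvPrefixB_fold]
  cases k with
  | zero => simp [pvPfx]
  | succ k =>
    simp only [List.singleton_append, List.getD_cons_succ]
    rw [pvPsl_getD nodes 0 k (by omega)]
    simp [pvPfx]

-- invariant of B's reverse pass: below c untouched; at/above c the next-equal-prefix link;
-- the dict maps v to the least index in [c, N] whose prefix sum is v
def pvNxtInv (nodes : List Int) (c : Nat) (st : List (Option Nat) × PySem.Dict Int Nat) : Prop :=
  st.1.length = nodes.length + 1 ∧
  (∀ k, c ≤ k → k ≤ nodes.length → st.1.getD k none = pvMj nodes k) ∧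
  (∀ v, st.2.get? v = (List.range' c (nodes.length + 1 - c)).find? (fun k => decide (pvPfx nodes k = v)))

theorem pvNxtInv_step (nodes : List Int) (c : Nat) (st : List (Option Nat) × PySem.Dict Int Nat)
    (hc : c ≤ nodes.length) (h : pvNxtInv nodes (c + 1) st) :
    pvNxtInv nodes c
      (st.1.set c (st.2.get? ((pvPrefixB nodes).getD c 0)),
       st.2.insert ((pvPrefixB nodes).getD c 0) c) := by
  obtain ⟨hlen, hnxt, hdict⟩ := h
  have hpc : (pvPrefixB nodes).getD c 0 = pvPfx nodes c := pvPrefixB_getD nodes c hc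
  have hrange : List.range' c (nodes.length + 1 - c)
      = c :: List.range' (c + 1) (nodes.length + 1 - (c + 1)) := by
    have : nodes.length + 1 - c = (nodes.length + 1 - (c + 1)) + 1 := by omega
    rw [this, List.range'_succ]
  refine ⟨by simp [hlen], ?_, ?_⟩
  · intro k hk1 hk2
    by_cases hkc : k = c
    · rw [hkc, List.getD_eq_getElem?_getD, List.getElem?_set_self (by omega), Option.getD_some, hpc,
        hdict, pvMj]
      have : nodes.length + 1 - (c + 1) = nodes.length - c := by omega
      rw [this]
    · rw [List.getD_eq_getElem?_getD, List.getElem?_set_ne (fun hh => hkc hh.symm),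
        ← List.getD_eq_getElem?_getD]
      exact hnxt k (by omega) hk2
  · intro v
    rw [PySem.Dict.get?_insert, hrange, List.find?_cons, hpc]
    by_cases hv : pvPfx nodes c = v
    · simp [hv]
    · have hv2 : ¬ v = pvPfx nodes c := fun h => hv h.symm
      simp [hv, hv2, hdict]

theorem pvNxtInv_fold (nodes : List Int) :
    ∀ (c : Nat) (st : List (Option Nat) × PySem.Dict Int Nat), c ≤ nodes.length + 1 →
    pvNxtInv nodes c st →
    pvNxtInv nodes 0
      (((List.range c).reverse).foldl
        (fun st k => (st.1.set k (st.2.get? ((pvPrefixB nodes).getD k 0)),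
                      st.2.insert ((pvPrefixB nodes).getD k 0) k)) st) := by
  intro c
  induction c with
  | zero => intro st _ h; exact h
  | succ c ih =>
    intro st hc h
    rw [List.range_succ, List.reverse_append, List.reverse_singleton, List.singleton_append,
      List.foldl_cons]
    exact ih _ (by omega) (pvNxtInv_step nodes c st (by omega) h)

theorem pvNxtB_getD (nodes : List Int) (i : Nat) (hi : i ≤ nodes.length) :
    (pvNxtB nodes (pvPrefixB nodes)).getD i none = pvMj nodes i := by
  have hinit : pvNxtInv nodes (nodes.length + 1)
      (List.replicate (nodes.length + 1) (none : Option Nat), (PySem.Dict.empty : PySem.Dict Int Nat)) := by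
    refine ⟨by simp, ?_, ?_⟩
    · intro k hk1 hk2; omega
    · intro v; simp [PySem.Dict.get?_empty]
  have := pvNxtInv_fold nodes (nodes.length + 1) _ le_rfl hinit
  exact this.2.1 i (Nat.zero_le i) hi

theorem pv_main (nodes : List Int) (nxt : List (Option Nat))
    (hnxt : ∀ i, i ≤ nodes.length → nxt.getD i none = pvMj nodes i) :
    ∀ (fuel i : Nat) (removed : List Bool), removed.length = nodes.length →
    nodes.length - i ≤ fuel →
    (∀ k, i ≤ k → k < nodes.length → removed.getD k false = false) →
    (List.range' i (nodes.length - i)).foldl (pvStepA nodes) removed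
      = pvLoopB nxt nodes.length fuel removed i := by
  intro fuel
  induction fuel with
  | zero =>
    intro i removed hlen hfuel hrem
    have : nodes.length - i = 0 := by omega
    rw [this, pvLoopB]
    rfl
  | succ fuel ih =>
    intro i removed hlen hfuel hrem
    rw [pvLoopB]
    by_cases hi : i < nodes.length
    · rw [if_pos hi, hnxt i (Nat.le_of_lt hi)]
      have hrangei : List.range' i (nodes.length - i)
          = i :: List.range' (i + 1) (nodes.length - (i + 1)) := by
        have : nodes.length - i = (nodes.length - (i + 1)) + 1 := by omega
        rw [this, List.range'_succ]
      rw [hrangei, List.foldl_cons, pvStepA_char nodes removed i hi hrem]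
      cases hmj : pvMj nodes i with
      | none =>
        exact ih (i + 1) removed hlen (by omega) (fun k h1 h2 => hrem k (by omega) h2)
      | some m =>
        have hm := pvMj_some nodes i m hmj
        set r' := (List.range' i (m - i)).foldl (fun r k => r.set k true) removed with hr'
        have hr'len : r'.length = nodes.length := by rw [hr', pv_markLen, hlen]
        have hr'getD : ∀ k, (i ≤ k → k < m → r'.getD k false = true)
            ∧ (m ≤ k → k < nodes.length → r'.getD k false = false) := by
          intro k
          rw [hr', pv_markGetD]
          constructor
          · intro h1 h2
            rw [if_pos ⟨List.mem_range'_1.mpr ⟨h1, by omega⟩, by omega⟩]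
          · intro h1 h2
            rw [if_neg (by simp only [List.mem_range'_1]; omega)]
            exact hrem k (by omega) h2
        have hsplit : List.range' (i + 1) (nodes.length - (i + 1))
            = List.range' (i + 1) (m - (i + 1)) ++ List.range' m (nodes.length - m) := by
          have happ := @List.range'_append (i + 1) (m - (i + 1)) (nodes.length - m) 1
          rw [show i + 1 + 1 * (m - (i + 1)) = m by omega] at happ
          rw [happ]
          congr 1
          omega
        rw [hsplit, List.foldl_append,
          pv_skip nodes (m - (i + 1)) (i + 1) r'
            (fun k h1 h2 => (hr'getD k).1 (by omega) (by omega))]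
        exact ih m r' hr'len (by omega) (fun k h1 h2 => (hr'getD k).2 h1 h2)
    · rw [if_neg hi]
      have : nodes.length - i = 0 := by omega
      rw [this]
      rfl

-- ===== VERDICT (by name: the statement is the Claim_ definition above) =====
theorem get_removed_nodes_py_spec : Claim_equal_get_removed_nodes_py := by
  intro nodes _
  unfold Spec_get_removed_nodes_py
  rw [get_removed_nodes_py, get_removed_nodes_py_alt, List.range_eq_range']
  have h := pv_main nodes (pvNxtB nodes (pvPrefixB nodes)) (pvNxtB_getD nodes)
    nodes.length 0 (List.replicate nodes.length false) (by simp) (by omega)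
    (fun k _ hk => by simp [List.getD_eq_getElem?_getD, hk])
  simpa using h
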